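-- pv_equiv track=rewrite | github.com/Warw1ck/algorithm_exercises | game_algorithms/transform_name_min_operations.py | check_operations_numbers_for_transformation_name
-- ===== SOURCE A (Python) =====
-- def check_operations_numbers_for_transformation_name(name, reference):
--     reference_chars = [ch for ch in reference]
--     name_chars = [ch for ch in name]
--     fixed_name = ['' for _ in reference]
--     transformation = False
--     for i in range(len(name)):
--         first_char = name_chars.pop()
--         if first_char not in reference_chars:
--             break
--         fixed_name[reference_chars.index(first_char)] = first_char
--         if fixed_name == reference_chars:
--             return f'The minimum operations required to convert "{name}" to "{reference}" are {i}'
--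
--     if not transformation:
--         return 'The name cannot be transformed!'
-- ===== SOURCE B (Python) =====
-- def check_operations_numbers_for_transformation_name(name, reference):
--     ref_set = set(reference)
--     distinct_ok = len(ref_set) == len(reference)
--     seen = set()
--     for i, ch in enumerate(reversed(name)):
--         if ch not in ref_set:
--             break
--         seen.add(ch)
--         if distinct_ok and len(seen) == len(ref_set):
--             return f'The minimum operations required to convert "{name}" to "{reference}" are {i}'
--     return 'The name cannot be transformed!'
-- ===== Notes on version B (the rewrite author's own statement) =====
-- stated objective: faster
-- what changed: Replaces A's positional fixed-name list maintained with list membership tests, index() placement and a full list comparison per popped char by a precomputed reference set, a one-time distinctness guard, and a growing seen-set whose size is compared to the reference set's size.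
import Mathlib
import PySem

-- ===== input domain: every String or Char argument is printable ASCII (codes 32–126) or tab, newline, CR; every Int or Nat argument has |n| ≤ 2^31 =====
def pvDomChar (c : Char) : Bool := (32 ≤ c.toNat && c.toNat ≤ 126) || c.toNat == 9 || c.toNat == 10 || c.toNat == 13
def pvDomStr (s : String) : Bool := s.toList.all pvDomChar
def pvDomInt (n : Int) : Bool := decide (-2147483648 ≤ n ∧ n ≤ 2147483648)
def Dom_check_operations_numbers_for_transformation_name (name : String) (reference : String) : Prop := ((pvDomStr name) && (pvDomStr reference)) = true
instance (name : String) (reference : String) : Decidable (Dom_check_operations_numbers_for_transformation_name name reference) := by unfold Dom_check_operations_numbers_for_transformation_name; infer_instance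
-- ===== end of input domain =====

-- B replaces A's positional fixed-name list (index() placement + full list comparison each pop) by a
-- one-time distinctness guard and a growing seen-set compared by size; same return value everywhere.

-- the f-string both programs format on success, and the shared failure message
def pvMsg (name reference : String) (i : Nat) : String :=
  "The minimum operations required to convert \"" ++ name ++ "\" to \"" ++ reference ++ "\" are " ++ toString i
def pvFail : String := "The name cannot be transformed!"

-- ===== PORT A =====
-- A's for-loop: name_chars.pop() walks name right-to-left; Python's '' placeholders are `none`,
-- placed single-char strings are `some c`, so `fixed = refChars.map some` is exactly
-- Python's `fixed_name == reference_chars` ('' never equals a 1-char string).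
-- `refChars.idxOf c` is exact for `reference_chars.index(first_char)` because membership was just checked.
def pvLoopA (name reference : String) (refChars : List Char) :
    List Char → Nat → List (Option Char) → String
  | [], _, _ => pvFail
  | c :: rest, i, fixed =>
    if c ∈ refChars then
      let fixed' := fixed.set (refChars.idxOf c) (some c)
      if fixed' = refChars.map some then pvMsg name reference i
      else pvLoopA name reference refChars rest (i + 1) fixed'
    else pvFail

def check_operations_numbers_for_transformation_name (name : String) (reference : String) : String :=
  pvLoopA name reference reference.toList name.toList.reverse 0
    (reference.toList.map (fun _ => (none : Option Char)))

-- ===== PORT B =====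
def pvLoopB (name reference : String) (refSet : PySem.Set Char) (distinctOk : Bool) :
    List Char → Nat → PySem.Set Char → String
  | [], _, _ => pvFail
  | c :: rest, i, seen =>
    if PySem.Set.contains refSet c then
      let seen' := PySem.Set.add seen c
      if distinctOk && decide (seen'.length = refSet.length) then pvMsg name reference i
      else pvLoopB name reference refSet distinctOk rest (i + 1) seen'
    else pvFail

def check_operations_numbers_for_transformation_name_alt (name : String) (reference : String) : String :=
  let refSet : PySem.Set Char := PySem.Set.ofList reference.toList
  pvLoopB name reference refSet (decide (refSet.length = reference.toList.length))
    name.toList.reverse 0 PySem.Set.empty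

-- ===== PRECONDITION & SPEC =====
def Spec_check_operations_numbers_for_transformation_name (name : String) (reference : String) (out : String) : Prop := out = check_operations_numbers_for_transformation_name_alt name reference
instance (name : String) (reference : String) (out : String) : Decidable (Spec_check_operations_numbers_for_transformation_name name reference out) := by unfold Spec_check_operations_numbers_for_transformation_name; infer_instance

-- ===== CLAIM (what is proved, stated in full; the proofs are below) =====
def Claim_equal_check_operations_numbers_for_transformation_name : Prop := ∀ (name : String) (reference : String), Dom_check_operations_numbers_for_transformation_name name reference → Spec_check_operations_numbers_for_transformation_name name reference (check_operations_numbers_for_transformation_name name reference)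

-- ===== LEMMAS AND PROOFS =====

-- A's fixed_name after the chars satisfying `p` have been placed: position j holds `some ref[j]`
-- exactly when ref[j] was seen and j is the FIRST index of that char (index() always hits the first).
def pvFixedOf (ref : List Char) (p : Char → Bool) : List (Option Char) :=
  ref.mapIdx (fun j c => if p c = true ∧ ref.idxOf c = j then some c else none)

theorem pvFixedOf_false (ref : List Char) :
    pvFixedOf ref (fun _ => false) = ref.map (fun _ => (none : Option Char)) := by
  apply List.ext_getElem
  · simp [pvFixedOf]
  · intro j h1 h2
    simp [pvFixedOf]

theorem pvFixedOf_congr (ref : List Char) (p q : Char → Bool) (h : ∀ x, p x = q x) :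
    pvFixedOf ref p = pvFixedOf ref q := by
  have : p = q := funext h
  rw [this]

theorem pvFixedOf_set (ref : List Char) (p : Char → Bool) (c : Char) (hc : c ∈ ref) :
    (pvFixedOf ref p).set (ref.idxOf c) (some c)
      = pvFixedOf ref (fun x => p x || x == c) := by
  have hlt : ref.idxOf c < ref.length := List.idxOf_lt_length_of_mem hc
  apply List.ext_getElem
  · simp [pvFixedOf]
  · intro j h1 h2
    have hj : j < ref.length := by simpa [pvFixedOf] using h2
    rw [List.getElem_set]
    by_cases hji : ref.idxOf c = j
    · subst hji
      have hrc : ref[ref.idxOf c] = c := List.getElem_idxOf hlt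
      simp [pvFixedOf, hrc]
    · by_cases hrc : ref[j] = c
      · simp [pvFixedOf, hji, hrc]
      · simp [pvFixedOf, hji, hrc]

theorem pvFixedOf_full (ref : List Char) (p : Char → Bool) :
    pvFixedOf ref p = ref.map some ↔ (ref.Nodup ∧ ∀ x ∈ ref, p x = true) := by
  constructor
  · intro h
    have hAll : ∀ (j : ℕ) (hj : j < ref.length),
        p ref[j] = true ∧ ref.idxOf ref[j] = j := by
      intro j hj
      have h1 : (pvFixedOf ref p).length = ref.length := by simp [pvFixedOf]
      have := List.getElem_of_eq h (i := j) (by simpa [pvFixedOf] using hj)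
      rw [List.getElem_map] at this
      simp only [pvFixedOf, List.getElem_mapIdx] at this
      by_cases hcond : p ref[j] = true ∧ ref.idxOf ref[j] = j
      · exact hcond
      · simp [hcond] at this
    constructor
    · rw [List.nodup_iff_injective_get]
      intro ⟨a, ha⟩ ⟨b, hb⟩ hab
      simp only [List.get_eq_getElem] at hab
      have h1 := (hAll a ha).2
      have h2 := (hAll b hb).2
      rw [hab] at h1
      simpa using h1.symm.trans h2
    · intro x hx
      obtain ⟨j, hj, rfl⟩ := List.mem_iff_getElem.mp hx
      exact (hAll j hj).1
  · rintro ⟨hnd, hall⟩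
    apply List.ext_getElem
    · simp [pvFixedOf]
    · intro j h1 h2
      have hj : j < ref.length := by simpa [pvFixedOf] using h1
      have hpx := hall ref[j] (List.getElem_mem hj)
      have hidx : ref.idxOf ref[j] = j := List.Nodup.idxOf_getElem hnd j hj
      simp [pvFixedOf, hpx, hidx]

-- two nodup lists with seen ⊆ S: equal length ⟺ S ⊆ seen
theorem pv_len_iff (seen S : List Char) (hnd : seen.Nodup) (hndS : S.Nodup)
    (hsub : ∀ x ∈ seen, x ∈ S) :
    seen.length = S.length ↔ ∀ x ∈ S, x ∈ seen := by
  have hsp : seen.Subperm S := List.Nodup.subperm hnd (fun x hx => hsub x hx)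
  constructor
  · intro hlen
    have hperm := hsp.perm_of_length_le (le_of_eq hlen.symm)
    intro x hx
    exact hperm.mem_iff.mpr hx
  · intro hsup
    have hsp2 : S.Subperm seen := List.Nodup.subperm hndS (fun x hx => hsup x hx)
    exact le_antisymm hsp.length_le hsp2.length_le

theorem pv_distinct_iff (ref : List Char) :
    (PySem.Set.ofList ref).length = ref.length ↔ ref.Nodup := by
  constructor
  · intro hlen
    have hsp : (PySem.Set.ofList ref).Subperm ref :=
      List.Nodup.subperm (PySem.Set.nodup_ofList ref)
        (fun x hx => (PySem.Set.mem_ofList _ _).mp hx)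
    have hperm := hsp.perm_of_length_le (le_of_eq hlen.symm)
    exact hperm.nodup (PySem.Set.nodup_ofList ref)
  · intro hnd
    rw [PySem.Set.ofList_eq_self_of_nodup ref hnd]

theorem pv_contains_add (seen : PySem.Set Char) (c x : Char) :
    (PySem.Set.add seen c).contains x = (seen.contains x || x == c) := by
  rw [PySem.Set.add_eq_ite]
  by_cases hc : c ∈ seen
  · rw [if_pos hc]
    by_cases hx : x = c
    · subst hx
      simp [hc]
    · simp [hx]
  · rw [if_neg hc]
    by_cases hx : x = c
    · simp [hx]
    · simp [hx]

theorem pvLoop_eq (name reference : String) (ref : List Char) :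
    ∀ (rev : List Char) (i : Nat) (seen : PySem.Set Char), seen.Nodup →
      (∀ x ∈ seen, x ∈ ref) →
      pvLoopA name reference ref rev i (pvFixedOf ref (fun x => seen.contains x))
        = pvLoopB name reference (PySem.Set.ofList ref)
            (decide ((PySem.Set.ofList ref).length = ref.length)) rev i seen := by
  intro rev
  induction rev with
  | nil => intro i seen _ _; rfl
  | cons c rest ih =>
    intro i seen hnd hsub
    rw [pvLoopA, pvLoopB]
    by_cases hc : c ∈ ref
    · have hcB : PySem.Set.contains (PySem.Set.ofList ref) c = true := by
        rw [PySem.Set.contains_iff, PySem.Set.mem_ofList]; exact hc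
      rw [if_pos hc, if_pos hcB]
      have hset : (pvFixedOf ref (fun x => seen.contains x)).set (ref.idxOf c) (some c)
          = pvFixedOf ref (fun x => (PySem.Set.add seen c).contains x) := by
        rw [pvFixedOf_set ref _ c hc]
        exact pvFixedOf_congr _ _ _ (fun x => (pv_contains_add seen c x).symm)
      have hnd' : (PySem.Set.add seen c).Nodup := PySem.Set.nodup_add seen c hnd
      have hsub' : ∀ x ∈ PySem.Set.add seen c, x ∈ ref := by
        intro x hx
        rcases (PySem.Set.mem_add _ _ _).mp hx with h | h
        · exact hsub x h
        · exact h ▸ hc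
      have hcondiff : (pvFixedOf ref (fun x => (PySem.Set.add seen c).contains x) = ref.map some)
          ↔ (decide ((PySem.Set.ofList ref).length = ref.length)
              && decide ((PySem.Set.add seen c).length = (PySem.Set.ofList ref).length)) = true := by
        rw [pvFixedOf_full]
        rw [Bool.and_eq_true, decide_eq_true_iff, decide_eq_true_iff]
        rw [pv_distinct_iff]
        rw [pv_len_iff _ _ hnd' (PySem.Set.nodup_ofList ref)
              (fun x hx => (PySem.Set.mem_ofList _ _).mpr (hsub' x hx))]
        constructor
        · rintro ⟨h1, h2⟩
          exact ⟨h1, fun x hx => by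
            have := h2 x ((PySem.Set.mem_ofList _ _).mp hx)
            exact List.contains_iff_mem.mp this⟩
        · rintro ⟨h1, h2⟩
          exact ⟨h1, fun x hx => List.contains_iff_mem.mpr
            (h2 x ((PySem.Set.mem_ofList _ _).mpr hx))⟩
      rw [hset]
      by_cases hdone : pvFixedOf ref (fun x => (PySem.Set.add seen c).contains x) = ref.map some
      · rw [if_pos hdone, if_pos (hcondiff.mp hdone)]
      · rw [if_neg hdone, if_neg (fun h => hdone (hcondiff.mpr h))]
        exact ih (i + 1) (PySem.Set.add seen c) hnd' hsub'
    · have hcB : PySem.Set.contains (PySem.Set.ofList ref) c = false := by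
        rw [Bool.eq_false_iff]
        intro h
        exact hc ((PySem.Set.mem_ofList _ _).mp ((PySem.Set.contains_iff _ _).mp h))
      rw [if_neg hc, hcB]
      simp [pvFail]

-- ===== VERDICT (by name: the statement is the Claim_ definition above) =====
theorem check_operations_numbers_for_transformation_name_spec : Claim_equal_check_operations_numbers_for_transformation_name := by
  intro name reference _
  unfold Spec_check_operations_numbers_for_transformation_name
  unfold check_operations_numbers_for_transformation_name
  unfold check_operations_numbers_for_transformation_name_alt
  have h0 : (reference.toList.map (fun _ => (none : Option Char)))
      = pvFixedOf reference.toList (fun x => (PySem.Set.empty : PySem.Set Char).contains x) := by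
    rw [← pvFixedOf_false]
    exact (pvFixedOf_congr _ _ _ (fun x => rfl)).symm
  rw [h0]
  exact pvLoop_eq name reference reference.toList name.toList.reverse 0 PySem.Set.empty
    List.nodup_nil (fun x hx => absurd hx (List.not_mem_nil))
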